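-- pv_equiv track=rewrite | github.com/GrammaTech/gtirb-vscode | server/__main__.py | isolate_token
-- ===== SOURCE A (Python) =====
-- delims = ['+', '-', '[', ']', ':', '{', '}', '*', ',']
--
-- def replace_delims(line):
--     for ch in delims:
--         line = line.replace(ch, ' ')
--     return line
--
-- def isolate_token(line, pos):
--     if pos < 0 or pos > len(line):
--         return None
--     # Get the token at the position in the line indicated by pos
--     # 1. replace all delimiters with spaces
--     space_line = replace_delims(line)
--     # 2. find beginning of token
--     i = pos
--     while space_line[i] != ' ' and i > 0:
--         i = i - 1
--     # (adjust: i is probably pointing to a space now)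
--     # (unless it went down to 0)
--     if space_line[i] == ' ':
--         i = i+1
--     # 3. find end of token
--     j = pos
--     while space_line[j] != ' ' and j < len(space_line)-1:
--         j = j + 1
--     # (adjust: j could be pointing at the end of the string now)
--     # (could be there is no space there)
--     if j == len(space_line)-1 and space_line[len(space_line)-1] != ' ':
--         j = j + 1
--     # return the substring
--     return line[i:j]
-- ===== SOURCE B (Python) =====
-- delims = ['+', '-', '[', ']', ':', '{', '}', '*', ',']
--
-- _SEPS = frozenset(delims) | {' '}
--
-- def isolate_token(line, pos):
--     # Tokenize the whole line into maximal non-separator spans in one forward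
--     # pass, then select the span containing pos (empty token if pos is on a
--     # separator).
--     if pos < 0 or pos >= len(line):
--         return None
--     spans = []
--     start = None
--     for k, ch in enumerate(line):
--         if ch in _SEPS:
--             if start is not None:
--                 spans.append((start, k))
--                 start = None
--         else:
--             if start is None:
--                 start = k
--     if start is not None:
--         spans.append((start, len(line)))
--     for a, b in spans:
--         if a <= pos < b:
--             return line[a:b]
--     return ''
-- ===== Notes on version B (the rewrite author's own statement) =====
-- stated objective: alternative
-- what changed: B tokenizes the whole line into maximal non-separator spans in one forward pass and then selects the span containing pos, instead of A's rewrite-every-delimiter-to-space passes (one full-line copy per delimiter) followed by an outward walk from pos; timing was borderline (~1.5-1.8x) and inconsistent, so no speed is claimed.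
import Mathlib
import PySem

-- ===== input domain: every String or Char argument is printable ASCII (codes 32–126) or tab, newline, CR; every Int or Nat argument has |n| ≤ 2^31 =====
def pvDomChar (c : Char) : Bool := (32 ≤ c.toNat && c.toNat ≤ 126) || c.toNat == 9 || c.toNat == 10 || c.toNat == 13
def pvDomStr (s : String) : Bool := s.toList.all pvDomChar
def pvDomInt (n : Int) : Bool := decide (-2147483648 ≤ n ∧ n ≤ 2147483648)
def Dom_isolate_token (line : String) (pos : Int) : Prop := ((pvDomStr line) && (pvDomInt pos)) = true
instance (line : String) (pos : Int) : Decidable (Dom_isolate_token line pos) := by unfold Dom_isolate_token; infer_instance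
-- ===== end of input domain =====

-- B replaces A's rewrite-delimiters-then-walk-outward strategy by a single forward tokenization
-- of the line into maximal non-separator spans, then selecting the span containing pos
-- (objective: alternative algorithm; no speed claimed).

-- ===== PORT A =====
-- delims = ['+', '-', '[', ']', ':', '{', '}', '*', ',']
def pyDelims : List String := ["+", "-", "[", "]", ":", "{", "}", "*", ","]

-- for ch in delims: line = line.replace(ch, ' ')
def replace_delims (line : String) : String :=
  pyDelims.foldl (fun l ch => PySem.Str.replace l ch " ") line

-- while space_line[i] != ' ' and i > 0: i = i - 1   (indexing total via getD; inside Pre_ all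
-- accesses are in range, so the default is never consulted)
def aBack (sl : List Char) : Nat → Nat
  | 0 => 0
  | i+1 => if sl.getD (i+1) ' ' ≠ ' ' then aBack sl i else i + 1

-- while space_line[j] != ' ' and j < len(space_line)-1: j = j + 1
def aFwd (sl : List Char) (j : Nat) : Nat :=
  if sl.getD j ' ' ≠ ' ' ∧ j < sl.length - 1 then aFwd sl (j+1) else j
termination_by sl.length - j
decreasing_by omega

def isolate_token (line : String) (pos : Int) : Option String :=
  if pos < 0 || pos > PySem.Str.len line then none
  else
    let space_line := replace_delims line
    let sl := space_line.toList
    let p := pos.toNat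
    let i0 := aBack sl p
    let i := if sl.getD i0 ' ' = ' ' then i0 + 1 else i0
    let j0 := aFwd sl p
    let j := if j0 = sl.length - 1 ∧ sl.getD (sl.length - 1) ' ' ≠ ' ' then j0 + 1 else j0
    some (PySem.Str.slice line (some (i : Int)) (some (j : Int)))

-- ===== PORT B =====
def sepsChars : List Char := [' ', '+', '-', '[', ']', ':', '{', '}', '*', ',']

-- the enumerate loop building the list of maximal non-separator spans, plus the
-- trailing append for a span that reaches the end of the line
def mkSpans : List Char → Nat → Option Nat → List (Nat × Nat)
  | [], _, none => []
  | [], k, some a => [(a, k)]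
  | c :: t, k, none =>
      if c ∈ sepsChars then mkSpans t (k+1) none else mkSpans t (k+1) (some k)
  | c :: t, k, some a =>
      if c ∈ sepsChars then (a, k) :: mkSpans t (k+1) none else mkSpans t (k+1) (some a)

-- for a, b in spans: if a <= pos < b: return line[a:b]
def findSpan : List (Nat × Nat) → Nat → Option (Nat × Nat)
  | [], _ => none
  | (a, b) :: t, p => if a ≤ p ∧ p < b then some (a, b) else findSpan t p

def isolate_token_alt (line : String) (pos : Int) : Option String :=
  if pos < 0 || PySem.Str.len line ≤ pos then none
  else
    match findSpan (mkSpans line.toList 0 none) pos.toNat with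
    | some (a, b) => some (PySem.Str.slice line (some (a : Int)) (some (b : Int)))
    | none => some ""

-- ===== PRECONDITION & SPEC =====
-- Pre_ excludes exactly the inputs where A raises IndexError: pos = len(line)
-- (space_line[pos] is out of range there, including the empty line at pos 0); B returns None there.
def Pre_isolate_token (line : String) (pos : Int) : Prop :=
  pos ≠ PySem.Str.len line
instance (line : String) (pos : Int) : Decidable (Pre_isolate_token line pos) := by
  unfold Pre_isolate_token; infer_instance

def pvWitness_isolate_token : String × Int := ("a+b", 0)

def Spec_isolate_token (line : String) (pos : Int) (out : Option String) : Prop := out = isolate_token_alt line pos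
instance (line : String) (pos : Int) (out : Option String) : Decidable (Spec_isolate_token line pos out) := by unfold Spec_isolate_token; infer_instance

-- ===== CLAIM (what is proved, stated in full; the proofs are below) =====
def Claim_equal_isolate_token : Prop := ∀ (line : String) (pos : Int), Dom_isolate_token line pos → Pre_isolate_token line pos → Spec_isolate_token line pos (isolate_token line pos)

-- ===== LEMMAS AND PROOFS =====

def delimChars : List Char := ['+', '-', '[', ']', ':', '{', '}', '*', ',']

def subAll (c : Char) : Char := if c ∈ delimChars then ' ' else c

-- the boundaries A's two walks compute, phrased on the original characters
def bBack (cs : List Char) : Nat → Nat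
  | 0 => 0
  | i+1 => if cs.getD i ' ' ∈ sepsChars then i + 1 else bBack cs i

def bFwd (cs : List Char) (j : Nat) : Nat :=
  if j < cs.length ∧ cs.getD j ' ' ∉ sepsChars then bFwd cs (j+1) else j
termination_by cs.length - j
decreasing_by omega

lemma replace_go_single (c d : Char) :
    ∀ (s acc : List Char), PySem.Chars.replace.go [c] [d] s.length s acc
      = acc.reverse ++ s.map (fun x => if x = c then d else x) := by
  intro s
  induction s with
  | nil => intro acc; simp [PySem.Chars.replace.go]
  | cons x t ih =>
    intro acc
    simp only [List.length_cons, PySem.Chars.replace.go, List.map_cons]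
    by_cases h : x = c
    · simp [h, List.isPrefixOf, ih]
    · simp [List.isPrefixOf, h, Ne.symm h, ih]

lemma replace_single (s : List Char) (c d : Char) :
    PySem.Chars.replace s [c] [d] = s.map (fun x => if x = c then d else x) := by
  rw [PySem.Chars.replace]
  simp [replace_go_single]

lemma toList_replace_char (s o n : String) (c d : Char) (ho : o.toList = [c]) (hn : n.toList = [d]) :
    (PySem.Str.replace s o n).toList = s.toList.map (fun x => if x = c then d else x) := by
  rw [PySem.Str.toList_replace, ho, hn, replace_single]

lemma replace_delims_toList (line : String) :
    (replace_delims line).toList = line.toList.map subAll := by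
  simp only [replace_delims, pyDelims, List.foldl_cons, List.foldl_nil]
  rw [toList_replace_char _ _ _ ',' ' ' (by decide) (by decide)]
  rw [toList_replace_char _ _ _ '*' ' ' (by decide) (by decide)]
  rw [toList_replace_char _ _ _ '}' ' ' (by decide) (by decide)]
  rw [toList_replace_char _ _ _ '{' ' ' (by decide) (by decide)]
  rw [toList_replace_char _ _ _ ':' ' ' (by decide) (by decide)]
  rw [toList_replace_char _ _ _ ']' ' ' (by decide) (by decide)]
  rw [toList_replace_char _ _ _ '[' ' ' (by decide) (by decide)]
  rw [toList_replace_char _ _ _ '-' ' ' (by decide) (by decide)]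
  rw [toList_replace_char _ _ _ '+' ' ' (by decide) (by decide)]
  simp only [List.map_map]
  apply List.map_congr_left
  intro c _
  by_cases hc : c ∈ delimChars
  · simp only [delimChars, List.mem_cons, List.not_mem_nil, or_false] at hc
    rcases hc with h|h|h|h|h|h|h|h|h <;> subst h <;> decide
  · simp only [delimChars, List.mem_cons, List.not_mem_nil, or_false, not_or] at hc
    obtain ⟨h1,h2,h3,h4,h5,h6,h7,h8,h9⟩ := hc
    simp [Function.comp, subAll, delimChars, h1,h2,h3,h4,h5,h6,h7,h8,h9]

lemma subAll_eq_space_iff (c : Char) : subAll c = ' ' ↔ c ∈ sepsChars := by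
  by_cases hc : c ∈ delimChars
  · simp only [subAll, hc, if_true, true_iff]
    simp only [delimChars, List.mem_cons, List.not_mem_nil, or_false] at hc
    simp [sepsChars]
    tauto
  · simp only [subAll, hc, if_false]
    simp only [delimChars, List.mem_cons, List.not_mem_nil, or_false, not_or] at hc
    simp [sepsChars]
    tauto

lemma map_getD_lt (cs : List Char) (k : Nat) (h : k < cs.length) :
    (cs.map subAll).getD k ' ' = subAll (cs.getD k ' ') := by
  simp [List.getD_eq_getElem?_getD, h]

lemma back_eq (cs : List Char) :
    ∀ i, i < cs.length → cs.getD i ' ' ∉ sepsChars →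
      (if (cs.map subAll).getD (aBack (cs.map subAll) i) ' ' = ' '
        then aBack (cs.map subAll) i + 1 else aBack (cs.map subAll) i) = bBack cs i := by
  intro i
  induction i with
  | zero =>
    intro h hs
    have h0 : (cs.map subAll).getD 0 ' ' ≠ ' ' := by
      rw [map_getD_lt cs 0 h]
      simpa [subAll_eq_space_iff] using hs
    simp only [aBack, bBack]
    rw [if_neg h0]
  | succ k ih =>
    intro h hs
    have hk1 : (cs.map subAll).getD (k+1) ' ' ≠ ' ' := by
      rw [map_getD_lt cs (k+1) h]
      simpa [subAll_eq_space_iff] using hs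
    have ha : aBack (cs.map subAll) (k+1) = aBack (cs.map subAll) k := by
      simp only [aBack]
      rw [if_pos hk1]
    rw [ha]
    simp only [bBack]
    by_cases hsk : cs.getD k ' ' ∈ sepsChars
    · rw [if_pos hsk]
      have hsl : (cs.map subAll).getD k ' ' = ' ' := by
        rw [map_getD_lt cs k (by omega)]
        exact (subAll_eq_space_iff _).mpr hsk
      cases k with
      | zero =>
        simp only [aBack]
        rw [if_pos hsl]
      | succ m =>
        have ha2 : aBack (cs.map subAll) (m+1) = m+1 := by
          simp only [aBack]
          rw [if_neg (not_not_intro hsl)]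
        rw [ha2, if_pos hsl]
    · rw [if_neg hsk]
      exact ih (by omega) hsk

lemma fwd_eq_aux (cs : List Char) :
    ∀ (m j : Nat), cs.length - j ≤ m → j < cs.length → cs.getD j ' ' ∉ sepsChars →
      (if aFwd (cs.map subAll) j = (cs.map subAll).length - 1 ∧
           (cs.map subAll).getD ((cs.map subAll).length - 1) ' ' ≠ ' '
        then aFwd (cs.map subAll) j + 1 else aFwd (cs.map subAll) j) = bFwd cs (j+1) := by
  intro m
  induction m with
  | zero => intro j hm hj _; omega
  | succ m ih =>
    intro j hm hj hs
    have hlen : (cs.map subAll).length = cs.length := by simp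
    have hjne : (cs.map subAll).getD j ' ' ≠ ' ' := by
      rw [map_getD_lt cs j hj]
      simpa [subAll_eq_space_iff] using hs
    by_cases hlast : j + 1 = cs.length
    · -- j is the last index: A stops, the final adjustment bumps j past the end
      have ha : aFwd (cs.map subAll) j = j := by
        rw [aFwd, if_neg]
        rintro ⟨-, h2⟩
        rw [hlen] at h2
        omega
      have hb : bFwd cs (j+1) = j+1 := by
        rw [bFwd, if_neg]
        rintro ⟨h1, -⟩
        omega
      have hidx : (cs.map subAll).length - 1 = j := by omega
      rw [ha, hb, if_pos ⟨by omega, by rw [hidx]; exact hjne⟩]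
    · -- j < len - 1: A advances
      have hstep : aFwd (cs.map subAll) j = aFwd (cs.map subAll) (j+1) := by
        rw [aFwd, if_pos ⟨hjne, by omega⟩]
      rw [hstep]
      by_cases hs2 : cs.getD (j+1) ' ' ∈ sepsChars
      · have hsl2 : (cs.map subAll).getD (j+1) ' ' = ' ' := by
          rw [map_getD_lt cs (j+1) (by omega)]
          exact (subAll_eq_space_iff _).mpr hs2
        have ha2 : aFwd (cs.map subAll) (j+1) = j+1 := by
          rw [aFwd, if_neg]
          rintro ⟨h1, -⟩
          exact h1 hsl2
        have hb : bFwd cs (j+1) = j+1 := by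
          rw [bFwd, if_neg]
          rintro ⟨-, h2⟩
          exact h2 hs2
        rw [ha2, hb, if_neg]
        rintro ⟨h1, h2⟩
        exact h2 (h1 ▸ hsl2)
      · have hb : bFwd cs (j+1) = bFwd cs (j+2) := by
          rw [bFwd, if_pos ⟨by omega, hs2⟩]
        rw [hb]
        exact ih (j+1) (by omega) (by omega) hs2

lemma fwd_eq (cs : List Char) (j : Nat) (hj : j < cs.length) (hs : cs.getD j ' ' ∉ sepsChars) :
    (if aFwd (cs.map subAll) j = (cs.map subAll).length - 1 ∧
         (cs.map subAll).getD ((cs.map subAll).length - 1) ' ' ≠ ' '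
      then aFwd (cs.map subAll) j + 1 else aFwd (cs.map subAll) j) = bFwd cs (j+1) :=
  fwd_eq_aux cs cs.length j (by omega) hj hs

-- boundary characterisations of the walk endpoints
lemma bBack_run (cs : List Char) (a : Nat) (h0 : a = 0 ∨ cs.getD (a-1) ' ' ∈ sepsChars) :
    ∀ p, a ≤ p → (∀ m, a ≤ m → m < p → cs.getD m ' ' ∉ sepsChars) → bBack cs p = a := by
  intro p
  induction p with
  | zero =>
    intro hap _
    have : a = 0 := by omega
    simp [bBack, this]
  | succ q ih =>
    intro hap hrun
    by_cases haq : a = q + 1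
    · have hsep : cs.getD q ' ' ∈ sepsChars := by
        rcases h0 with h | h
        · omega
        · simpa [haq] using h
      simp only [bBack]
      rw [if_pos hsep, haq]
    · have haq' : a ≤ q := by omega
      have hq : cs.getD q ' ' ∉ sepsChars := hrun q haq' (by omega)
      simp only [bBack]
      rw [if_neg hq]
      exact ih haq' (fun m hm1 hm2 => hrun m hm1 (by omega))

lemma bFwd_run (cs : List Char) (e : Nat) (he : e = cs.length ∨ cs.getD e ' ' ∈ sepsChars)
    (hel : e ≤ cs.length) :
    ∀ (n j : Nat), e - j ≤ n → j ≤ e → (∀ m, j ≤ m → m < e → cs.getD m ' ' ∉ sepsChars) →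
      bFwd cs j = e := by
  intro n
  induction n with
  | zero =>
    intro j hn hje _
    have hj : j = e := by omega
    subst hj
    rw [bFwd, if_neg]
    rintro ⟨h1, h2⟩
    rcases he with h | h
    · omega
    · exact h2 h
  | succ n ih =>
    intro j hn hje hrun
    by_cases hj : j = e
    · subst hj
      rw [bFwd, if_neg]
      rintro ⟨h1, h2⟩
      rcases he with h | h
      · omega
      · exact h2 h
    · have hjlt : j < e := by omega
      rw [bFwd, if_pos ⟨by omega, hrun j le_rfl hjlt⟩]
      exact ih (j+1) (by omega) (by omega) (fun m hm1 hm2 => hrun m (by omega) hm2)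

lemma mkSpans_lb : ∀ (t : List Char) (k : Nat) (start : Option Nat) (a b : Nat),
    (∀ a0, start = some a0 → a0 ≤ k) →
    (a, b) ∈ mkSpans t k start → (match start with | none => k | some a0 => a0) ≤ a := by
  intro t
  induction t with
  | nil =>
    intro k start a b hst hmem
    cases start with
    | none => simp [mkSpans] at hmem
    | some a0 =>
      simp only [mkSpans, List.mem_singleton, Prod.mk.injEq] at hmem
      show a0 ≤ a
      omega
  | cons c t ih =>
    intro k start a b hst hmem
    cases start with
    | none =>
      simp only [mkSpans] at hmem
      split at hmem
      · have h' : k + 1 ≤ a := ih (k+1) none a b (by simp) hmem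
        show k ≤ a
        omega
      · have h' : k ≤ a := ih (k+1) (some k) a b (by intro a0 h; cases h; omega) hmem
        show k ≤ a
        omega
    | some a0 =>
      have ha0 : a0 ≤ k := hst a0 rfl
      simp only [mkSpans] at hmem
      split at hmem
      · rcases List.mem_cons.mp hmem with h | h
        · cases h
          exact le_refl a
        · have h' : k + 1 ≤ a := ih (k+1) none a b (by simp) h
          show a0 ≤ a
          omega
      · have h' : a0 ≤ a := ih (k+1) (some a0) a b (by intro x h; cases h; omega) hmem
        show a0 ≤ a
        exact h'

lemma findSpan_eq_none (l : List (Nat × Nat)) (p : Nat)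
    (h : ∀ a b, (a, b) ∈ l → p < a) : findSpan l p = none := by
  induction l with
  | nil => rfl
  | cons x t ih =>
    obtain ⟨a, b⟩ := x
    have ha := h a b (List.mem_cons_self ..)
    simp only [findSpan]
    rw [if_neg (by omega)]
    exact ih (fun a b hm => h a b (List.mem_cons_of_mem _ hm))

-- the main invariant: selecting from the tokenizer's spans equals A's two walks
lemma spans_main (cs : List Char) : ∀ (n k p : Nat) (start : Option Nat),
    cs.length - k = n → k ≤ cs.length → p < cs.length →
    (match start with
     | none => k ≤ p ∧ (k = 0 ∨ cs.getD (k-1) ' ' ∈ sepsChars)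
     | some a => a ≤ p ∧ a ≤ k ∧ (a = 0 ∨ cs.getD (a-1) ' ' ∈ sepsChars) ∧
         (∀ m, a ≤ m → m < k → cs.getD m ' ' ∉ sepsChars)) →
    findSpan (mkSpans (cs.drop k) k start) p
      = if cs.getD p ' ' ∈ sepsChars then none else some (bBack cs p, bFwd cs (p+1)) := by
  intro n
  induction n with
  | zero =>
    intro k p start hn hk hp hinv
    have hkl : k = cs.length := by omega
    subst hkl
    cases start with
    | none => omega
    | some a =>
      obtain ⟨hap, hak, hbd, hrun⟩ := hinv
      rw [List.drop_length]
      simp only [mkSpans, findSpan]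
      rw [if_pos ⟨hap, hp⟩]
      have hps : cs.getD p ' ' ∉ sepsChars := hrun p hap hp
      rw [if_neg hps]
      have h1 : bBack cs p = a := bBack_run cs a hbd p hap (fun m h1 h2 => hrun m h1 (by omega))
      have h2 : bFwd cs (p+1) = cs.length :=
        bFwd_run cs cs.length (Or.inl rfl) le_rfl cs.length (p+1) (by omega) (by omega)
          (fun m hm1 hm2 => hrun m (by omega) hm2)
      rw [h1, h2]
  | succ n ih =>
    intro k p start hn hk hp hinv
    have hklt : k < cs.length := by omega
    have hdrop : cs.drop k = cs.getD k ' ' :: cs.drop (k+1) := by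
      rw [List.drop_eq_getElem_cons hklt, List.getD_eq_getElem cs ' ' hklt]
    rw [hdrop]
    by_cases hck : cs.getD k ' ' ∈ sepsChars
    · -- separator at k
      cases start with
      | none =>
        obtain ⟨hkp, _⟩ := hinv
        simp only [mkSpans]
        rw [if_pos hck]
        by_cases hpk : p = k
        · subst hpk
          rw [if_pos hck]
          exact findSpan_eq_none _ _ (fun a b hm => by
            have h' : p + 1 ≤ a := mkSpans_lb (cs.drop (p+1)) (p+1) none a b (by simp) hm
            omega)
        · exact ih (k+1) p none (by omega) (by omega) hp ⟨by omega, Or.inr (by simpa using hck)⟩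
      | some a =>
        obtain ⟨hap, hak, hbd, hrun⟩ := hinv
        simp only [mkSpans]
        rw [if_pos hck]
        simp only [findSpan]
        by_cases hin : a ≤ p ∧ p < k
        · rw [if_pos hin]
          have hps : cs.getD p ' ' ∉ sepsChars := hrun p hin.1 hin.2
          rw [if_neg hps]
          have h1 : bBack cs p = a := bBack_run cs a hbd p hap (fun m h1 h2 => hrun m h1 (by omega))
          have h2 : bFwd cs (p+1) = k :=
            bFwd_run cs k (Or.inr hck) (by omega) k (p+1) (by omega) (by omega)
              (fun m hm1 hm2 => hrun m (by omega) hm2)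
          rw [h1, h2]
        · rw [if_neg hin]
          by_cases hpk : p = k
          · subst hpk
            rw [if_pos hck]
            exact findSpan_eq_none _ _ (fun a' b' hm => by
              have h' : p + 1 ≤ a' := mkSpans_lb (cs.drop (p+1)) (p+1) none a' b' (by simp) hm
              omega)
          · have hpk' : k < p := by omega
            exact ih (k+1) p none (by omega) (by omega) hp
              ⟨by omega, Or.inr (by simpa using hck)⟩
    · -- token character at k
      cases start with
      | none =>
        obtain ⟨hkp, hbd⟩ := hinv
        simp only [mkSpans]
        rw [if_neg hck]
        exact ih (k+1) p (some k) (by omega) (by omega) hp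
          ⟨hkp, by omega, hbd, fun m hm1 hm2 => by
            have : m = k := by omega
            subst this; exact hck⟩
      | some a =>
        obtain ⟨hap, hak, hbd, hrun⟩ := hinv
        simp only [mkSpans]
        rw [if_neg hck]
        exact ih (k+1) p (some a) (by omega) (by omega) hp
          ⟨hap, by omega, hbd, fun m hm1 hm2 => by
            by_cases hmk : m = k
            · subst hmk; exact hck
            · exact hrun m hm1 (by omega)⟩

-- ===== VERDICT (by name: the statement is the Claim_ definition above) =====
theorem isolate_token_spec : Claim_equal_isolate_token := by
  intro line pos _ hpre
  unfold Pre_isolate_token at hpre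
  unfold Spec_isolate_token isolate_token isolate_token_alt
  have hlen := PySem.Str.len_eq line
  by_cases h1 : pos < 0
  · rw [if_pos (by simp [h1]), if_pos (by simp [h1])]
  by_cases h2 : PySem.Str.len line < pos
  · rw [if_pos (by simp only [Bool.or_eq_true, decide_eq_true_eq]; omega), if_pos (by simp only [Bool.or_eq_true, decide_eq_true_eq]; omega)]
  have h0 : 0 ≤ pos := by omega
  have hlt : pos < (line.toList.length : Int) := by rw [hlen] at hpre h2; omega
  have hn : pos.toNat < line.toList.length := by omega
  rw [if_neg (by simp only [hlen, Bool.or_eq_true, decide_eq_true_eq, not_or]; omega),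
      if_neg (by simp only [hlen, Bool.or_eq_true, decide_eq_true_eq, not_or]; omega)]
  simp only [replace_delims_toList]
  obtain ⟨p, hp⟩ : ∃ p : Nat, pos.toNat = p := ⟨pos.toNat, rfl⟩
  rw [hp] at hn ⊢
  have hmain := spans_main line.toList line.toList.length 0 p none rfl (Nat.zero_le _) hn
    ⟨Nat.zero_le _, Or.inl rfl⟩
  rw [List.drop_zero] at hmain
  rw [hmain]
  by_cases hsep : line.toList.getD p ' ' ∈ sepsChars
  · -- the cursor sits on a separator: both return the empty token
    rw [if_pos hsep]
    have hsl : (line.toList.map subAll).getD p ' ' = ' ' := by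
      rw [map_getD_lt _ p hn]
      exact (subAll_eq_space_iff _).mpr hsep
    have haB : aBack (line.toList.map subAll) p = p := by
      cases p with
      | zero => simp [aBack]
      | succ k =>
        simp only [aBack]
        rw [if_neg (not_not_intro hsl)]
    have haF : aFwd (line.toList.map subAll) p = p := by
      rw [aFwd, if_neg]
      rintro ⟨h1, -⟩
      exact h1 hsl
    rw [haB, haF, if_pos hsl, if_neg]
    · refine congrArg some (String.toList_inj.mp ?_)
      rw [PySem.Str.toList_slice, PySem.Chars.slice_eq_listSlice, PySem.List.slice_natCast]
      rw [show p - (p + 1) = 0 from by omega]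
      simp
    · rintro ⟨h1, h2⟩
      exact h2 (h1 ▸ hsl)
  · -- on a token character: A's two walks land exactly on the selected span's boundaries
    rw [if_neg hsep, back_eq _ p hn hsep, fwd_eq _ p hn hsep]
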